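-- pv_equiv track=rewrite | github.com/981377660LMT/algorithm-study | 22_专题/公式变形/2489. Number of Substrings With Fixed Ratio.py | fixedRatio
-- ===== SOURCE A (Python) =====
-- from collections import defaultdict
--
-- def fixedRatio(s: str, num1: int, num2: int) -> int:
--     """求子数组个数,1的个数/0的个数 = num1/num2"""
--     nums = list(map(int, s))
--     res, counter, preSum = 0, [0, 0], defaultdict(int, {0: 1})
--     for num in nums:
--         counter[num] += 1
--         cur = num2 * counter[0] - num1 * counter[1]
--         res += preSum[cur]
--         preSum[cur] += 1
--     return res
-- ===== SOURCE B (Python) =====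
-- def fixedRatio(s: str, num1: int, num2: int) -> int:
--     """求子数组个数,1的个数/0的个数 = num1/num2"""
--     keys = [0]
--     zeros = ones = 0
--     for bit in map(int, s):
--         zeros += 1 - bit
--         ones += bit
--         keys.append(num2 * zeros - num1 * ones)
--     keys.sort()
--     res = 0
--     i = 0
--     n = len(keys)
--     while i < n:
--         j = i + 1
--         while j < n and keys[j] == keys[i]:
--             j += 1
--         c = j - i
--         res += c * (c - 1) // 2
--         i = j
--     return res
-- ===== Notes on version B (the rewrite author's own statement) =====
-- stated objective: alternative
-- what changed: B replaces A's incremental hash-map (defaultdict) pair counting with a sort-then-scan: it materialises the n+1 prefix keys, sorts them, and counts c*(c-1)//2 over each maximal equal run with a two-pointer scan, using no dictionary at all.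
import Mathlib
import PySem

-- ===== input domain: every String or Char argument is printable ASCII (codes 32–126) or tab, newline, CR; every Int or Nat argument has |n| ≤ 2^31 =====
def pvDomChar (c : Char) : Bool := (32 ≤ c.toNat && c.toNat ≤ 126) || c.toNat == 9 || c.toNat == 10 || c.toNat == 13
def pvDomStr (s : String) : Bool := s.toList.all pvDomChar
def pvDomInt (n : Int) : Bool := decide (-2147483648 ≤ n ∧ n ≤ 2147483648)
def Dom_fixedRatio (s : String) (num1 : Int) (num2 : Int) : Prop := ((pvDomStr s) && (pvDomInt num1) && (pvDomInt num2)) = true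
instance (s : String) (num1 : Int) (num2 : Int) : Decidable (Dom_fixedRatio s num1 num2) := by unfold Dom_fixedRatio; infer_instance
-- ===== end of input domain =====

-- B sorts the n+1 prefix keys and counts pairs by a two-pointer scan over maximal equal runs
-- (no hash map), instead of A's incremental defaultdict pass; alternative algorithm, O(n log n) vs O(n).


-- ===== PORT A =====
-- nums = list(map(int, s)); int(c) via PySem.Int.ofStr? (none = ValueError, excluded by Pre_,
-- where the .getD 0 default is never reached); counter is the two-element list [c0, c1]
-- (counter[num] for num ∉ {0,1} is an IndexError, also excluded by Pre_, so only the
-- num = 0 / num = 1 branches are ever taken inside Pre_).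
def fixedRatio (s : String) (num1 : Int) (num2 : Int) : Int :=
  let nums := s.toList.map (fun c => (PySem.Int.ofStr? (String.mk [c])).getD 0)
  let r := nums.foldl
    (fun (st : Int × Int × Int × PySem.Dict Int Int) (num : Int) =>
      let res := st.1
      let c0 := if num = 0 then st.2.1 + 1 else st.2.1
      let c1 := if num = 1 then st.2.2.1 + 1 else st.2.2.1
      let preSum := st.2.2.2
      let cur := num2 * c0 - num1 * c1
      (res + preSum.getD cur 0, c0, c1, preSum.insert cur (preSum.getD cur 0 + 1)))
    (0, 0, 0, (PySem.Dict.empty).insert 0 1)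
  r.1

-- ===== PORT B =====
-- the group-scan phase of Source B: the outer 'while i < n' is the recursion, the inner
-- 'while j < n and keys[j] == keys[i]' that advances j over the run equals takeWhile,
-- and 'i = j' (skipping the run) equals dropWhile; c = j - i is the run length.
def pvGroupScan : List Int → Int
  | [] => 0
  | a :: t =>
    let c : Int := ((t.takeWhile (fun x => x == a)).length : Int) + 1
    PySem.Int.floordiv (c * (c - 1)) 2 + pvGroupScan (t.dropWhile (fun x => x == a))
termination_by l => l.length
decreasing_by
  exact Nat.lt_succ_of_le (List.Sublist.length_le (List.dropWhile_sublist _))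

-- each bit via int(ch) (PySem.Int.ofStr?; the .getD 0 default is never reached where B returns);
-- keys.sort() is PySem.List.sorted with the identity key.
def fixedRatio_alt (s : String) (num1 : Int) (num2 : Int) : Int :=
  let st := s.toList.foldl
    (fun (st : List Int × Int × Int) (ch : Char) =>
      let bit := (PySem.Int.ofStr? (String.mk [ch])).getD 0
      let zeros := st.2.1 + (1 - bit)
      let ones := st.2.2 + bit
      (st.1 ++ [num2 * zeros - num1 * ones], zeros, ones))
    ([(0 : Int)], 0, 0)
  pvGroupScan (PySem.List.sorted st.1 (fun x => x) false)

-- ===== PRECONDITION & SPEC =====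
-- Pre_ excludes exactly the strings on which A raises: any character other than '0'/'1'
-- gives ValueError (int(c) on a non-digit) or IndexError (counter[num] for a digit ≥ 2).
def Pre_fixedRatio (s : String) (num1 : Int) (num2 : Int) : Prop :=
  (s.toList.all (fun c => c == '0' || c == '1')) = true
instance (s : String) (num1 : Int) (num2 : Int) : Decidable (Pre_fixedRatio s num1 num2) := by
  unfold Pre_fixedRatio; infer_instance
def pvWitness_fixedRatio : String × Int × Int := ("0110", 1, 1)

def Spec_fixedRatio (s : String) (num1 : Int) (num2 : Int) (out : Int) : Prop := out = fixedRatio_alt s num1 num2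
instance (s : String) (num1 : Int) (num2 : Int) (out : Int) : Decidable (Spec_fixedRatio s num1 num2 out) := by unfold Spec_fixedRatio; infer_instance

-- ===== CLAIM (what is proved, stated in full; the proofs are below) =====
def Claim_equal_fixedRatio : Prop := ∀ (s : String) (num1 : Int) (num2 : Int), Dom_fixedRatio s num1 num2 → Pre_fixedRatio s num1 num2 → Spec_fixedRatio s num1 num2 (fixedRatio s num1 num2)
-- ===== LEMMAS AND PROOFS =====

-- C2 c = c*(c-1)//2, the pair count of a group of size c
def pvC2 (c : Int) : Int := PySem.Int.floordiv (c * (c - 1)) 2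

-- sum of pair counts over the groups of a key list
def pvT (ks : List Int) : Int :=
  ((PySem.Set.ofList ks).map (fun k => pvC2 ((ks.count k : Int)))).sum

-- A's add-then-increment loop over a list of keys
def pvFoldK (ks : List Int) (r : Int) (d : PySem.Dict Int Int) : Int × PySem.Dict Int Int :=
  ks.foldl (fun p k => (p.1 + p.2.getD k 0, p.2.insert k (p.2.getD k 0 + 1))) (r, d)

-- the per-character key sequence both programs compute
def pvKeys (num1 num2 : Int) : List Char → Int → Int → List Int
  | [], _, _ => []
  | c :: cs, c0, c1 =>
    let c0' := if c = '0' then c0 + 1 else c0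
    let c1' := if c = '0' then c1 else c1 + 1
    (num2 * c0' - num1 * c1') :: pvKeys num1 num2 cs c0' c1'

lemma pvC2_succ (c : Int) : pvC2 (c + 1) = pvC2 c + c := by
  unfold pvC2
  rw [PySem.Int.floordiv_eq_ediv_of_pos (by omega), PySem.Int.floordiv_eq_ediv_of_pos (by omega)]
  have h1 : (c + 1) * (c + 1 - 1) = c * (c - 1) + 2 * c := by ring
  rw [h1]; omega

lemma pvFoldK_cons (k : Int) (ks : List Int) (r : Int) (d : PySem.Dict Int Int) :
    pvFoldK (k :: ks) r d = pvFoldK ks (r + d.getD k 0) (d.insert k (d.getD k 0 + 1)) := rfl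

lemma pvFoldK_snd (ks : List Int) : ∀ (r : Int) (d : PySem.Dict Int Int),
    (pvFoldK ks r d).2 = ks.foldl (fun d k => d.insert k (d.getD k 0 + 1)) d := by
  induction ks with
  | nil => intro r d; rfl
  | cons k ks ih => intro r d; rw [pvFoldK_cons, ih]; rfl

lemma pvSum_map_congr_except {l : List Int} (hn : l.Nodup) {k : Int} (hk : k ∈ l)
    (f g : Int → Int) (h : ∀ j ∈ l, j ≠ k → g j = f j) :
    (l.map g).sum = (l.map f).sum + (g k - f k) := by
  induction l with
  | nil => cases hk
  | cons a t ih =>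
    rcases List.nodup_cons.mp hn with ⟨ha, ht⟩
    rcases List.mem_cons.mp hk with rfl | hkt
    · have : t.map g = t.map f := by
        apply List.map_congr_left
        intro j hj
        exact h j (List.mem_cons_of_mem _ hj) (fun he => ha (he ▸ hj))
      simp [this]; ring
    · have hak : a ≠ k := fun he => ha (he ▸ hkt)
      have hga : g a = f a := h a (List.mem_cons_self) hak
      have := ih ht hkt (fun j hj hjk => h j (List.mem_cons_of_mem _ hj) hjk)
      simp [hga, this]; ring

lemma pvT_append_singleton (ks : List Int) (k : Int) :
    pvT (ks ++ [k]) = pvT ks + ks.count k := by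
  unfold pvT
  rw [PySem.Set.ofList_append_singleton]
  by_cases hk : k ∈ ks
  · rw [PySem.Set.add_of_mem ((PySem.Set.mem_ofList ks k).mpr hk)]
    have hx := pvSum_map_congr_except (l := PySem.Set.ofList ks) (PySem.Set.nodup_ofList ks)
      ((PySem.Set.mem_ofList ks k).mpr hk)
      (f := fun j => pvC2 ((ks.count j : Int)))
      (g := fun j => pvC2 (((ks ++ [k]).count j : Int)))
      (by
        intro j _ hjk
        have hcj : (ks ++ [k]).count j = ks.count j := by
          have : List.count j [k] = 0 := List.count_eq_zero_of_not_mem (by simp [hjk])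
          simp [List.count_append, this]
        simp only [hcj])
    rw [hx]
    have hck : (ks ++ [k]).count k = ks.count k + 1 := by simp [List.count_append]
    simp only [hck]
    push_cast
    rw [pvC2_succ]
    ring
  · rw [PySem.Set.add_of_not_mem (fun h => hk ((PySem.Set.mem_ofList ks k).mp h))]
    have h1 : (PySem.Set.ofList ks).map (fun j => pvC2 (((ks ++ [k]).count j : Int)))
        = (PySem.Set.ofList ks).map (fun j => pvC2 ((ks.count j : Int))) := by
      apply List.map_congr_left
      intro j hj
      have hjk : j ≠ k := fun he => hk (he ▸ (PySem.Set.mem_ofList ks j).mp hj)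
      have hcj : (ks ++ [k]).count j = ks.count j := by
        have : List.count j [k] = 0 := List.count_eq_zero_of_not_mem (by simp [hjk])
        simp [List.count_append, this]
      simp only [hcj]
    have hck : (ks ++ [k]).count k = 1 := by
      simp [List.count_append, List.count_eq_zero_of_not_mem hk]
    have hck0 : ks.count k = 0 := List.count_eq_zero_of_not_mem hk
    rw [List.map_append, List.sum_append, h1]
    simp [hck0, pvC2]

-- L(ks): A's loop from the empty dict computes the combinatorial pair count
lemma pvFoldK_fst_eq_pvT (ks : List Int) :
    (pvFoldK ks 0 PySem.Dict.empty).1 = pvT ks := by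
  induction ks using List.reverseRecOn with
  | nil => rfl
  | append_singleton ks k ih =>
    unfold pvFoldK
    rw [List.foldl_append]
    have hsnd := pvFoldK_snd ks 0 PySem.Dict.empty
    unfold pvFoldK at hsnd ih
    have hcnt : (ks.foldl (fun d k => d.insert k (d.getD k 0 + 1)) PySem.Dict.empty)
        = PySem.Dict.counter ks := PySem.Dict.foldl_insert_getD_add_one_eq_counter ks
    simp only [List.foldl_cons, List.foldl_nil]
    rw [pvT_append_singleton]
    have : ((ks.foldl (fun (p : Int × PySem.Dict Int Int) k =>
        (p.1 + p.2.getD k 0, p.2.insert k (p.2.getD k 0 + 1))) (0, PySem.Dict.empty)).2).getD k 0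
        = ks.count k := by
      rw [hsnd, hcnt, PySem.Dict.getD_counter]
    rw [this, ih]

-- B's key-building loop produces ks ++ pvKeys (inside Pre_)
lemma pvB_keys (num1 num2 : Int) (l : List Char) (h : ∀ c ∈ l, c = '0' ∨ c = '1') :
    ∀ (ks : List Int) (c0 c1 : Int),
    (l.foldl (fun (st : List Int × Int × Int) (ch : Char) =>
      let bit := (PySem.Int.ofStr? (String.mk [ch])).getD 0
      let zeros := st.2.1 + (1 - bit)
      let ones := st.2.2 + bit
      (st.1 ++ [num2 * zeros - num1 * ones], zeros, ones)) (ks, c0, c1)).1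
    = ks ++ pvKeys num1 num2 l c0 c1 := by
  induction l with
  | nil => intro ks c0 c1; simp [pvKeys]
  | cons c cs ih =>
    intro ks c0 c1
    have hcs : ∀ x ∈ cs, x = '0' ∨ x = '1' := fun x hx => h x (List.mem_cons_of_mem _ hx)
    rcases h c List.mem_cons_self with rfl | rfl
    · have hnum : (PySem.Int.ofStr? (String.mk ['0'])).getD 0 = 0 := by decide
      simp only [List.foldl_cons, pvKeys, hnum]
      rw [ih hcs]
      norm_num
    · have hnum : (PySem.Int.ofStr? (String.mk ['1'])).getD 0 = 1 := by decide
      simp only [List.foldl_cons, pvKeys, hnum,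
        if_neg (by decide : ¬ ('1' : Char) = '0')]
      rw [ih hcs]
      norm_num

-- A's loop over the characters equals the key loop over pvKeys (inside Pre_)
lemma pvA_fold (num1 num2 : Int) (l : List Char) (h : ∀ c ∈ l, c = '0' ∨ c = '1') :
    ∀ (res c0 c1 : Int) (d : PySem.Dict Int Int),
    ((l.map (fun c => (PySem.Int.ofStr? (String.mk [c])).getD 0)).foldl
      (fun (st : Int × Int × Int × PySem.Dict Int Int) (num : Int) =>
        let res := st.1
        let c0 := if num = 0 then st.2.1 + 1 else st.2.1
        let c1 := if num = 1 then st.2.2.1 + 1 else st.2.2.1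
        let preSum := st.2.2.2
        let cur := num2 * c0 - num1 * c1
        (res + preSum.getD cur 0, c0, c1, preSum.insert cur (preSum.getD cur 0 + 1)))
      (res, c0, c1, d)).1
    = (pvFoldK (pvKeys num1 num2 l c0 c1) res d).1 := by
  induction l with
  | nil => intro res c0 c1 d; rfl
  | cons c cs ih =>
    intro res c0 c1 d
    have hcs : ∀ c ∈ cs, c = '0' ∨ c = '1' := fun x hx => h x (List.mem_cons_of_mem _ hx)
    rcases h c List.mem_cons_self with rfl | rfl
    · have hnum : (PySem.Int.ofStr? (String.mk ['0'])).getD 0 = 0 := by decide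
      simp only [List.map_cons, List.foldl_cons, hnum, pvKeys, pvFoldK_cons]
      simp only [if_neg (by decide : ¬ (0 : Int) = 1)]
      exact ih hcs _ _ _ _
    · have hnum : (PySem.Int.ofStr? (String.mk ['1'])).getD 0 = 1 := by decide
      simp only [List.map_cons, List.foldl_cons, hnum, pvKeys, pvFoldK_cons]
      simp only [if_neg (by decide : ¬ (1 : Int) = 0),
        if_neg (by decide : ¬ ('1' : Char) = '0')]
      exact ih hcs _ _ _ _

-- pvT is invariant under permutation of the key list
lemma pvT_perm {l l' : List Int} (h : l.Perm l') : pvT l = pvT l' := by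
  unfold pvT
  have hp : (PySem.Set.ofList l).Perm (PySem.Set.ofList l') := by
    rw [List.perm_ext_iff_of_nodup (PySem.Set.nodup_ofList l) (PySem.Set.nodup_ofList l')]
    intro a
    rw [PySem.Set.mem_ofList, PySem.Set.mem_ofList]
    exact h.mem_iff
  calc ((PySem.Set.ofList l).map (fun k => pvC2 ((l.count k : Int)))).sum
      = ((PySem.Set.ofList l).map (fun k => pvC2 ((l'.count k : Int)))).sum := by
        congr 1
        apply List.map_congr_left
        intro k _
        rw [h.count_eq]
    _ = _ := (hp.map _).sum_eq

-- pushing an a-free prefix of the accumulator through Set.add folds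
lemma pvFoldlAdd_cons (a : Int) (d : List Int) (hd : a ∉ d) :
    ∀ s : List Int, List.foldl PySem.Set.add (a :: s) d = a :: List.foldl PySem.Set.add s d := by
  induction d with
  | nil => intro s; rfl
  | cons x d' ih =>
    intro s
    have hx : x ≠ a := fun he => hd (he ▸ List.mem_cons_self)
    have hd' : a ∉ d' := fun h => hd (List.mem_cons_of_mem _ h)
    have hadd : PySem.Set.add (a :: s) x = a :: PySem.Set.add s x := by
      simp [PySem.Set.add, PySem.Set.contains, hx]
      split_ifs <;> simp
    rw [List.foldl_cons, hadd, List.foldl_cons, ih hd']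

lemma pvOfList_grouped (a : Int) (r d : List Int) (hr : ∀ x ∈ r, x = a) (hd : a ∉ d) :
    PySem.Set.ofList (a :: (r ++ d)) = a :: PySem.Set.ofList d := by
  have h0 : PySem.Set.ofList (a :: (r ++ d)) = List.foldl PySem.Set.add [a] (r ++ d) := rfl
  have h1 : ∀ r' : List Int, (∀ x ∈ r', x = a) → List.foldl PySem.Set.add [a] r' = [a] := by
    intro r'
    induction r' with
    | nil => intro _; rfl
    | cons x r'' ih =>
      intro hr'
      have hx : x = a := hr' x List.mem_cons_self
      subst hx
      have hadd : PySem.Set.add [x] x = [x] := PySem.Set.add_of_mem List.mem_cons_self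
      rw [List.foldl_cons, hadd]
      exact ih (fun y hy => hr' y (List.mem_cons_of_mem _ hy))
  rw [h0, List.foldl_append, h1 r hr]
  exact pvFoldlAdd_cons a d hd []

-- pvT of a grouped list: the front block of a's contributes C2 of its size
lemma pvT_grouped (a : Int) (r d : List Int) (hr : ∀ x ∈ r, x = a) (hd : a ∉ d) :
    pvT (a :: (r ++ d)) = pvC2 ((r.length : Int) + 1) + pvT d := by
  unfold pvT
  rw [pvOfList_grouped a r d hr hd, List.map_cons, List.sum_cons]
  have hca : (a :: (r ++ d)).count a = r.length + 1 := by
    have h1 : r.count a = r.length := List.count_eq_length.mpr (fun b hb => (hr b hb).symm)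
    have h2 : d.count a = 0 := List.count_eq_zero_of_not_mem hd
    simp [List.count_append, h1, h2]
  have hmap : (PySem.Set.ofList d).map (fun k => pvC2 (((a :: (r ++ d)).count k : Int)))
      = (PySem.Set.ofList d).map (fun k => pvC2 ((d.count k : Int))) := by
    apply List.map_congr_left
    intro k hk
    have hka : k ≠ a := fun he => hd (he ▸ (PySem.Set.mem_ofList d k).mp hk)
    have h1 : r.count k = 0 := List.count_eq_zero_of_not_mem
      (fun hkr => hka (hr k hkr))
    have : (a :: (r ++ d)).count k = d.count k := by
      simp [List.count_append, h1, Ne.symm hka]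
    rw [this]
  rw [hca, hmap]
  push_cast
  ring_nf

lemma pvDropWhile_head_false {p : Int → Bool} :
    ∀ (t : List Int) (x : Int) (d' : List Int), t.dropWhile p = x :: d' → p x = false := by
  intro t
  induction t with
  | nil => intro x d' h; cases h
  | cons y t ih =>
    intro x d' h
    by_cases hy : p y
    · rw [List.dropWhile_cons_of_pos hy] at h
      exact ih _ _ h
    · rw [List.dropWhile_cons_of_neg hy] at h
      cases h
      simpa using hy

-- the two-pointer scan over a sorted list computes pvT
lemma pvGroupScan_eq_pvT : ∀ (n : Nat) (l : List Int), l.length ≤ n →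
    l.Pairwise (· ≤ ·) → pvGroupScan l = pvT l := by
  intro n
  induction n with
  | zero =>
    intro l hl _
    have : l = [] := List.eq_nil_of_length_eq_zero (Nat.le_zero.mp hl)
    subst this
    rw [pvGroupScan]
    rfl
  | succ n ih =>
    intro l hl hp
    cases l with
    | nil => rw [pvGroupScan]; rfl
    | cons a t =>
      have hr : ∀ x ∈ t.takeWhile (fun x => x == a), x = a := by
        intro x hx
        have := List.mem_takeWhile_imp hx
        exact eq_of_beq this
      have hd : a ∉ t.dropWhile (fun x => x == a) := by
        intro ha
        cases hdw : t.dropWhile (fun x => x == a) with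
        | nil => rw [hdw] at ha; cases ha
        | cons x d' =>
          rw [hdw] at ha
          have hxne : x ≠ a := by
            have := pvDropWhile_head_false t x d' hdw
            simpa using this
          have hxt : x ∈ t := List.Sublist.mem (hdw ▸ List.mem_cons_self) (List.dropWhile_sublist _)
          have hax : a ≤ x := (List.pairwise_cons.mp hp).1 x hxt
          have haxlt : a < x := lt_of_le_of_ne hax (Ne.symm hxne)
          rcases List.mem_cons.mp ha with rfl | had'
          · exact absurd rfl hxne
          · have hpd : (t.dropWhile (fun x => x == a)).Pairwise (· ≤ ·) :=
              List.Pairwise.sublist (List.dropWhile_sublist _) ((List.pairwise_cons.mp hp).2)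
            rw [hdw] at hpd
            have : x ≤ a := (List.pairwise_cons.mp hpd).1 a had'
            omega
      have ht : t = t.takeWhile (fun x => x == a) ++ t.dropWhile (fun x => x == a) :=
        (List.takeWhile_append_dropWhile).symm
      have hlen : (t.dropWhile (fun x => x == a)).length ≤ n := by
        have h1 : (t.dropWhile (fun x => x == a)).length ≤ t.length :=
          List.Sublist.length_le (List.dropWhile_sublist _)
        simp at hl
        omega
      have hpd : (t.dropWhile (fun x => x == a)).Pairwise (· ≤ ·) :=
        List.Pairwise.sublist (List.dropWhile_sublist _) ((List.pairwise_cons.mp hp).2)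
      have hstep : pvGroupScan (a :: t)
          = pvC2 (((t.takeWhile (fun x => x == a)).length : Int) + 1)
            + pvGroupScan (t.dropWhile (fun x => x == a)) := by
        rw [pvGroupScan]
        rfl
      rw [hstep, ih _ hlen hpd]
      conv_rhs => rw [ht]
      rw [pvT_grouped a _ _ hr hd]

-- ===== VERDICT (by name: the statement is the Claim_ definition above) =====
theorem fixedRatio_spec : Claim_equal_fixedRatio := by
  intro s num1 num2 _ hpre0
  have hpre : ∀ c ∈ s.toList, c = '0' ∨ c = '1' := by
    intro c hc
    have := List.all_eq_true.mp hpre0 c hc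
    simpa using this
  show fixedRatio s num1 num2 = fixedRatio_alt s num1 num2
  have hA : fixedRatio s num1 num2
      = (pvFoldK (pvKeys num1 num2 s.toList 0 0) 0 (PySem.Dict.empty.insert 0 1)).1 := by
    exact pvA_fold num1 num2 s.toList hpre 0 0 0 (PySem.Dict.empty.insert 0 1)
  set K := pvKeys num1 num2 s.toList 0 0 with hK
  have hB : fixedRatio_alt s num1 num2
      = pvGroupScan (PySem.List.sorted ((0 : Int) :: K) (fun x => x) false) := by
    have h := pvB_keys num1 num2 s.toList hpre [(0 : Int)] 0 0
    have h0 : fixedRatio_alt s num1 num2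
        = pvGroupScan (PySem.List.sorted ((s.toList.foldl
            (fun (st : List Int × Int × Int) (ch : Char) =>
              let bit := (PySem.Int.ofStr? (String.mk [ch])).getD 0
              let zeros := st.2.1 + (1 - bit)
              let ones := st.2.2 + bit
              (st.1 ++ [num2 * zeros - num1 * ones], zeros, ones)) ([(0 : Int)], 0, 0)).1)
            (fun x => x) false) := rfl
    rw [h0, h, hK, List.singleton_append]
  have hsorted : pvGroupScan (PySem.List.sorted ((0 : Int) :: K) (fun x => x) false)
      = pvT ((0 : Int) :: K) := by
    have hperm : (PySem.List.sorted ((0 : Int) :: K) (fun x => x) false).Perm ((0 : Int) :: K) :=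
      PySem.List.sorted_perm _ _ _
    have hpw : (PySem.List.sorted ((0 : Int) :: K) (fun x => x) false).Pairwise (· ≤ ·) :=
      PySem.List.sorted_pairwise _ _
    rw [pvGroupScan_eq_pvT (PySem.List.sorted ((0 : Int) :: K) (fun x => x) false).length _
      le_rfl hpw]
    exact pvT_perm hperm
  have hstep : (pvFoldK ((0 : Int) :: K) 0 PySem.Dict.empty).1
      = (pvFoldK K 0 (PySem.Dict.empty.insert 0 1)).1 := by
    rw [pvFoldK_cons]
    norm_num [PySem.Dict.getD_empty]
  rw [hA, hB, hsorted, ← hstep, pvFoldK_fst_eq_pvT]
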